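-- pv_equiv track=rewrite | github.com/NRina4/Theory-Of-Graphs | dop_2.py | find_regular_subgraphs
-- ===== SOURCE A (Python) =====
-- from itertools import combinations
--
-- def is_k_regular(graph, subset, k):
--     """
--     Проверяет, является ли подграф, порожденный subset, k-правильным.
--     """
--     # Подсчет степени каждой вершины в подграфе
--     degree = {v: 0 for v in subset}
--     for u, v in graph:
--         if u in subset and v in subset:  # Ребро внутри подграфа
--             degree[u] += 1
--             degree[v] += 1
--     # Проверяем, равна ли степень каждой вершины k
--     return all(deg == k for deg in degree.values())
--
-- def find_regular_subgraphs(n, edges):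
--     """
--     Находит все правильные подграфы для всех возможных степеней k.
--     """
--     vertices = range(n)
--     regular_subgraphs = {}  # Словарь для хранения подграфов по степеням k
--     max_degree = n - 1  # Максимальная возможная степень вершины
--
--     # Перебираем все подмножества вершин
--     for r in range(1, n + 1):  # Минимальный размер подграфа — 1 вершина
--         for subset in combinations(vertices, r):
--             subset_set = set(subset)
--             # Проверяем для всех возможных k
--             for k in range(max_degree + 1):
--                 if is_k_regular(edges, subset_set, k):
--                     if k not in regular_subgraphs:
--                         regular_subgraphs[k] = []
--                     regular_subgraphs[k].append(subset_set)
--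
--     return regular_subgraphs
-- ===== SOURCE B (Python) =====
-- from itertools import combinations
--
-- def find_regular_subgraphs(n, edges):
--     # Build an adjacency index once (multiplicity-preserving; a self-loop (u,u)
--     # contributes its endpoint twice), then score each subset via the index.
--     adj = {}
--     for u, v in edges:
--         adj.setdefault(u, []).append(v)
--         adj.setdefault(v, []).append(u)
--
--     result = {}
--     for r in range(1, n + 1):
--         for subset in combinations(range(n), r):
--             sset = set(subset)
--             degs = [len([w for w in adj.get(v, []) if w in sset]) for v in subset]
--             d = degs[0]
--             if all(x == d for x in degs[1:]) and d <= n - 1: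
--                 result.setdefault(d, []).append(sset)
--     return result
-- ===== Notes on version B (the rewrite author's own statement) =====
-- stated objective: alternative
-- what changed: B builds an adjacency index over the edges once and, per subset, computes each vertex's within-subset degree from its neighbor list and appends under the common degree d directly, instead of A's rescanning the whole edge list for every subset and every candidate k in 0..n-1.
import Mathlib
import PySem

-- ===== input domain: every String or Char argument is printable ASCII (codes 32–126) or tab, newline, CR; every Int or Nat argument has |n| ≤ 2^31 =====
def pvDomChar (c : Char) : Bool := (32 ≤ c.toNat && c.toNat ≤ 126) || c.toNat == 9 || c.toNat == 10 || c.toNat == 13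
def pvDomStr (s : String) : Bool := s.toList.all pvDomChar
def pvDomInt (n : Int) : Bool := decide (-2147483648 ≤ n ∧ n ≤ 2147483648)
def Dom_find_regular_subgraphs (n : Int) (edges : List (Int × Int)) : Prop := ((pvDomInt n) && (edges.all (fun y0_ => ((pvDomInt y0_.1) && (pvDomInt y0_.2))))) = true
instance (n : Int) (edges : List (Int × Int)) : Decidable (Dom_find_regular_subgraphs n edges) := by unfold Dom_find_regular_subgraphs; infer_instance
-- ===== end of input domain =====

-- B builds the adjacency index once and scores each subset from it (common degree d,
-- appended directly under key d) instead of A's per-subset, per-k full edge rescans.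

-- ===== PORT A =====
def is_k_regular (graph : List (Int × Int)) (subset : List Int) (k : Int) : Bool :=
  -- degree = {v: 0 for v in subset}
  let degree : PySem.Dict Int Int := subset.foldl (fun d v => d.insert v 0) PySem.Dict.empty
  -- for u, v in graph: if u in subset and v in subset: degree[u] += 1; degree[v] += 1
  let degree := graph.foldl (fun d e =>
      if subset.contains e.1 && subset.contains e.2 then
        (d.modify e.1 0 (· + 1)).modify e.2 0 (· + 1)
      else d) degree
  -- all(deg == k for deg in degree.values())
  degree.values.all (fun deg => deg == k)

def find_regular_subgraphs (n : Int) (edges : List (Int × Int)) : List (Int × List (List Int)) :=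
  let vertices := PySem.List.pyRange 0 n 1
  let max_degree := n - 1
  let regular_subgraphs : PySem.Dict Int (List (List Int)) :=
    (PySem.List.pyRange 1 (n + 1) 1).foldl (fun rs r =>
      (PySem.List.combinations vertices r.toNat).foldl (fun rs subset =>
        let subset_set := PySem.Set.ofList subset
        (PySem.List.pyRange 0 (max_degree + 1) 1).foldl (fun rs k =>
          if is_k_regular edges subset_set k then
            let rs := if rs.contains k then rs else rs.insert k []
            rs.modify k [] (fun l => l ++ [subset_set])
          else rs) rs) rs) PySem.Dict.empty
  regular_subgraphs.items

-- ===== PORT B =====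
def find_regular_subgraphs_alt (n : Int) (edges : List (Int × Int)) : List (Int × List (List Int)) :=
  -- adjacency index: adj.setdefault(u, []).append(v); adj.setdefault(v, []).append(u)
  let adj : PySem.Dict Int (List Int) :=
    edges.foldl (fun d e => (d.modify e.1 [] (· ++ [e.2])).modify e.2 [] (· ++ [e.1])) PySem.Dict.empty
  let result : PySem.Dict Int (List (List Int)) :=
    (PySem.List.pyRange 1 (n + 1) 1).foldl (fun rs r =>
      (PySem.List.combinations (PySem.List.pyRange 0 n 1) r.toNat).foldl (fun rs subset =>
        let sset := PySem.Set.ofList subset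
        let degs := subset.map (fun v => (((adj.getD v []).filter (fun w => sset.contains w)).length : Int))
        (match degs with
         | [] => rs
         | d :: rest =>
           if rest.all (fun x => x == d) && decide (d ≤ n - 1) then
             rs.modify d [] (fun l => l ++ [sset])
           else rs)) rs) PySem.Dict.empty
  result.items

-- ===== PRECONDITION & SPEC =====
def Spec_find_regular_subgraphs (n : Int) (edges : List (Int × Int)) (out : List (Int × List (List Int))) : Prop := out = find_regular_subgraphs_alt n edges
instance (n : Int) (edges : List (Int × Int)) (out : List (Int × List (List Int))) : Decidable (Spec_find_regular_subgraphs n edges out) := by unfold Spec_find_regular_subgraphs; infer_instance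

-- ===== CLAIM (what is proved, stated in full; the proofs are below) =====
def Claim_equal_find_regular_subgraphs : Prop := ∀ (n : Int) (edges : List (Int × Int)), Dom_find_regular_subgraphs n edges → Spec_find_regular_subgraphs n edges (find_regular_subgraphs n edges)

-- ===== LEMMAS AND PROOFS =====

-- per-edge contribution of edge e to the within-subset degree of v (A's counting rule)
def degC (s : List Int) (v : Int) (e : Int × Int) : Int :=
  if s.contains e.1 && s.contains e.2 then (if e.1 = v then 1 else 0) + (if e.2 = v then 1 else 0) else 0

-- A's zero-initialisation: every key of s maps to 0
theorem getD_init_zero (s : List Int) (d : PySem.Dict Int Int) (v : Int) :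
    (s.foldl (fun d v => d.insert v 0) d).getD v 0 = if v ∈ s then 0 else d.getD v 0 := by
  induction s generalizing d with
  | nil => simp
  | cons a s ih =>
    simp only [List.foldl_cons, ih]
    by_cases hv : v = a
    · subst hv
      by_cases hm : v ∈ s <;> simp [hm, PySem.Dict.getD_insert_self]
    · by_cases hm : v ∈ s <;> simp [hm, hv, PySem.Dict.getD_insert_of_ne _ _ _ hv]

-- A's edge loop adds, for each vertex, the sum of the per-edge contributions
theorem getD_degfold (s : List Int) (edges : List (Int × Int)) (d : PySem.Dict Int Int) (v : Int) :
    ((edges.foldl (fun d e =>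
        if s.contains e.1 && s.contains e.2 then
          (d.modify e.1 0 (· + 1)).modify e.2 0 (· + 1)
        else d) d).getD v 0) = d.getD v 0 + ((edges.map (degC s v)).sum) := by
  induction edges generalizing d with
  | nil => simp
  | cons e es ih =>
    simp only [List.foldl_cons, List.map_cons, List.sum_cons]
    by_cases hg : (s.contains e.1 && s.contains e.2) = true
    · rw [if_pos hg, ih]
      simp only [degC, if_pos hg, PySem.Dict.getD_modify]
      by_cases h2 : v = e.2 <;> by_cases h1 : v = e.1 <;>
        simp only [h2, h1, if_true, eq_comm] <;> split_ifs <;> simp_all <;> ring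
    · rw [if_neg hg, ih]
      simp only [degC, if_neg hg]
      ring

-- A's edge loop does not change the key list when both endpoints are already keys
theorem keys_degfold (s : List Int) (edges : List (Int × Int)) (d : PySem.Dict Int Int)
    (hs : ∀ x ∈ s, d.contains x = true) :
    (edges.foldl (fun d e =>
        if s.contains e.1 && s.contains e.2 then
          (d.modify e.1 0 (· + 1)).modify e.2 0 (· + 1)
        else d) d).keys = d.keys := by
  induction edges generalizing d with
  | nil => rfl
  | cons e es ih =>
    simp only [List.foldl_cons]
    by_cases hg : (s.contains e.1 && s.contains e.2) = true
    · have h1 : d.contains e.1 = true := hs e.1 (by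
        have := (Bool.and_eq_true _ _).mp hg
        exact (List.contains_iff_mem).mp this.1)
      have h2 : d.contains e.2 = true := hs e.2 (by
        have := (Bool.and_eq_true _ _).mp hg
        exact (List.contains_iff_mem).mp this.2)
      have e1 : ((d.modify e.1 0 (· + 1)).modify e.2 0 (· + 1)).keys = d.keys := by
        rw [PySem.Dict.keys_modify, PySem.Dict.keys_insert_of_contains, PySem.Dict.keys_modify,
          PySem.Dict.keys_insert_of_contains _ _ h1]
        simp [PySem.Dict.contains_modify, h2]
      rw [if_pos hg, ih]
      · exact e1
      · intro x hx
        simp [PySem.Dict.contains_modify, hs x hx]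
    · rw [if_neg hg]
      exact ih d hs

-- keys of the zero-initialised dict are exactly s (s duplicate-free)
theorem keys_init (s : List Int) (h : s.Nodup) :
    (s.foldl (fun d v => d.insert v 0) (PySem.Dict.empty : PySem.Dict Int Int)).keys = s := by
  have h1 := PySem.Dict.keys_foldl_insert s (fun _ _ => (0 : Int)) PySem.Dict.empty
  simp only [h1]
  have h2 : PySem.Set.update (PySem.Dict.empty : PySem.Dict Int Int).keys s = PySem.Set.ofList s := rfl
  rw [h2, PySem.Set.ofList_eq_self_of_nodup s h]

-- characterisation of is_k_regular on a duplicate-free subset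
theorem is_k_regular_eq (edges : List (Int × Int)) (s : List Int) (h : s.Nodup) (k : Int) :
    is_k_regular edges s k = s.all (fun v => ((edges.map (degC s v)).sum == k)) := by
  simp only [is_k_regular]
  set d0 : PySem.Dict Int Int := s.foldl (fun d v => d.insert v 0) PySem.Dict.empty with hd0
  have hk0 : d0.keys = s := keys_init s h
  have hcon : ∀ x ∈ s, d0.contains x = true := by
    intro x hx
    exact (PySem.Dict.contains_iff_mem_keys d0 x).mpr (by rw [hk0]; exact hx)
  set dg := edges.foldl (fun d e =>
      if s.contains e.1 && s.contains e.2 then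
        (d.modify e.1 0 (· + 1)).modify e.2 0 (· + 1)
      else d) d0 with hdg
  have hkeys : dg.keys = s := by rw [hdg, keys_degfold s edges d0 hcon, hk0]
  have hvals : dg.values = s.map (fun v => dg.getD v 0) := by
    rw [PySem.Dict.values_eq_map_keys dg (by rw [hkeys]; exact h) 0, hkeys]
  have hmap : s.map (fun v => dg.getD v 0) = s.map (fun v => (edges.map (degC s v)).sum) := by
    apply List.map_congr_left
    intro v hv
    rw [hdg, getD_degfold, hd0, getD_init_zero]
    simp [hv]
  rw [hvals, hmap, List.all_map]
  rfl

-- B's adjacency lookup is the multiplicity-preserving neighbor list of v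
theorem getD_adj (edges : List (Int × Int)) (d : PySem.Dict Int (List Int)) (v : Int) :
    ((edges.foldl (fun d e => (d.modify e.1 [] (· ++ [e.2])).modify e.2 [] (· ++ [e.1])) d).getD v []) =
      d.getD v [] ++ edges.flatMap (fun e => (if e.1 = v then [e.2] else []) ++ (if e.2 = v then [e.1] else [])) := by
  induction edges generalizing d with
  | nil => simp
  | cons e es ih =>
    simp only [List.foldl_cons, List.flatMap_cons, ih, PySem.Dict.getD_modify]
    by_cases h2 : v = e.2 <;> by_cases h1 : v = e.1 <;>
      simp only [h2, h1, eq_comm, if_true] <;> split_ifs <;> simp_all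

-- B's per-vertex degree equals A's per-edge sum, for v inside the subset
theorem degB_eq (edges : List (Int × Int)) (s : List Int) (v : Int) (hv : v ∈ s) :
    (((edges.flatMap (fun e => (if e.1 = v then [e.2] else []) ++ (if e.2 = v then [e.1] else []))).filter
        (fun w => s.contains w)).length : Int) = (edges.map (degC s v)).sum := by
  induction edges with
  | nil => simp
  | cons e es ih =>
    have hvc : s.contains v = true := List.contains_iff_mem.mpr hv
    simp only [List.flatMap_cons, List.filter_append, List.length_append, List.map_cons, List.sum_cons]
    have h : ((((if e.1 = v then [e.2] else []) ++ (if e.2 = v then [e.1] else [])).filter (fun w => s.contains w)).length : Int) = degC s v e := by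
      simp only [degC, List.filter_append, List.length_append]
      by_cases h1 : e.1 = v <;> by_cases h2 : e.2 = v <;>
        by_cases c1 : s.contains e.1 <;> by_cases c2 : s.contains e.2 <;>
          simp_all
    simp only [List.filter_append, List.length_append] at h
    push_cast at h ⊢
    omega

-- the k-loop fires at most once: the guard forces k = d
theorem fold_fire_once {β : Type} (l : List Int) (hnd : l.Nodup) (d : Int) (p : Int → Bool)
    (hp : ∀ k, p k = true → k = d) (app : β → Int → β) (rs : β) :
    l.foldl (fun rs k => if p k then app rs k else rs) rs =
      if d ∈ l ∧ p d = true then app rs d else rs := by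
  induction l generalizing rs with
  | nil => simp
  | cons a l ih =>
    have hnd' : l.Nodup := hnd.of_cons
    simp only [List.foldl_cons]
    by_cases ha : p a = true
    · have had : a = d := hp a ha
      subst had
      have hdn : a ∉ l := (List.nodup_cons.mp hnd).1
      rw [ha]
      simp only [if_true]
      rw [ih hnd']
      simp only [List.mem_cons, true_or, ha, and_true, if_pos]
      simp [hdn]
    · simp only [Bool.not_eq_true] at ha
      rw [ha]
      simp only [Bool.false_eq_true, if_false]
      rw [ih hnd']
      by_cases had : a = d
      · subst had
        simp [ha]
      · simp [Ne.symm had]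

-- A's append-step (setdefault-style) equals B's single modify-step
theorem app_eq (rs : PySem.Dict Int (List (List Int))) (k : Int) (x : List Int) :
    ((if rs.contains k then rs else rs.insert k []).modify k [] (fun l => l ++ [x])) =
      rs.modify k [] (fun l => l ++ [x]) := by
  by_cases h : rs.contains k
  · simp [h]
  · simp only [h, Bool.false_eq_true, if_false, PySem.Dict.modify]
    rw [PySem.Dict.getD_insert_self, PySem.Dict.insert_insert_self]
    congr 1
    have h2 : rs.get? k = none := by
      simp [PySem.Dict.get?_eq_none_iff_contains, h]
    simp [PySem.Dict.getD, h2]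

-- per-subset equality of A's k-loop body and B's direct-scoring body
theorem subset_step_eq (n : Int) (edges : List (Int × Int)) (subset : List Int)
    (hnd : subset.Nodup) (hne : subset ≠ [])
    (rs : PySem.Dict Int (List (List Int))) :
    (PySem.List.pyRange 0 ((n - 1) + 1) 1).foldl (fun rs k =>
        if is_k_regular edges (PySem.Set.ofList subset) k then
          (if rs.contains k then rs else rs.insert k []).modify k [] (fun l => l ++ [PySem.Set.ofList subset])
        else rs) rs =
      (match subset.map (fun v =>
          ((((edges.foldl (fun d e => (d.modify e.1 [] (· ++ [e.2])).modify e.2 [] (· ++ [e.1])) PySem.Dict.empty).getD v []).filter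
              (fun w => (PySem.Set.ofList subset).contains w)).length : Int)) with
        | [] => rs
        | d :: rest =>
          if rest.all (fun x => x == d) && decide (d ≤ n - 1) then
            rs.modify d [] (fun l => l ++ [PySem.Set.ofList subset])
          else rs) := by
  rw [PySem.Set.ofList_eq_self_of_nodup subset hnd]
  simp only [show ∀ (s : List Int) (w : Int), PySem.Set.contains s w = s.contains w from fun _ _ => rfl]
  have hdegs : subset.map (fun v =>
      ((((edges.foldl (fun d e => (d.modify e.1 [] (· ++ [e.2])).modify e.2 [] (· ++ [e.1])) PySem.Dict.empty).getD v []).filter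
          (fun w => subset.contains w)).length : Int)) =
      subset.map (fun v => (edges.map (degC subset v)).sum) := by
    apply List.map_congr_left
    intro v hv
    rw [getD_adj]
    have hemp : (PySem.Dict.empty : PySem.Dict Int (List Int)).getD v [] = [] := rfl
    rw [hemp, List.nil_append, degB_eq edges subset v hv]
  rw [hdegs]
  obtain ⟨a, t, rfl⟩ : ∃ a t, subset = a :: t := by
    cases subset with
    | nil => exact absurd rfl hne
    | cons a t => exact ⟨a, t, rfl⟩
  simp only [List.map_cons]
  set d := (edges.map (degC (a :: t) a)).sum with hd
  set rest := t.map (fun v => (edges.map (degC (a :: t) v)).sum) with hrest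
  have hbody : (fun (rs : PySem.Dict Int (List (List Int))) (k : Int) =>
      if is_k_regular edges (a :: t) k then
        (if rs.contains k then rs else rs.insert k []).modify k [] (fun l => l ++ (a :: t) :: [])
      else rs) = (fun rs k =>
      if (d :: rest).all (fun x => x == k) then rs.modify k [] (fun l => l ++ [a :: t]) else rs) := by
    funext rs k
    rw [is_k_regular_eq edges (a :: t) hnd k, app_eq]
    have hall : (a :: t).all (fun v => ((edges.map (degC (a :: t) v)).sum == k)) = (d :: rest).all (fun x => x == k) := by
      simp [hd, hrest, List.all_map, Function.comp_def]
    rw [hall]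
  rw [hbody]
  rw [fold_fire_once _ (PySem.List.nodup_pyRange_one 0 (n - 1 + 1)) d
      (fun k => (d :: rest).all (fun x => x == k)) (by
        intro k hk
        simp only [List.all_cons, Bool.and_eq_true, beq_iff_eq] at hk
        exact hk.1.symm) (fun rs k => rs.modify k [] (fun l => l ++ [a :: t])) rs]
  have hd0 : 0 ≤ d := by
    have hcast : d = ((((edges.flatMap (fun e => (if e.1 = a then [e.2] else []) ++ (if e.2 = a then [e.1] else []))).filter
        (fun w => (a :: t).contains w)).length : Int)) := (degB_eq edges (a :: t) a (by simp)).symm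
    rw [hcast]
    exact Int.natCast_nonneg _
  by_cases hrg : d ∈ PySem.List.pyRange 0 (n - 1 + 1) 1
  · have hle : d ≤ n - 1 := by
      have := (PySem.List.mem_pyRange_one.mp hrg).2
      omega
    simp only [hrg, true_and, hle, decide_true, Bool.and_true, List.all_cons, BEq.rfl, Bool.true_and]
  · have hgt : ¬ (d ≤ n - 1) := by
      intro hle
      exact hrg (PySem.List.mem_pyRange_one.mpr ⟨hd0, by omega⟩)
    simp only [hgt, decide_false, Bool.and_false, Bool.false_eq_true, if_false]
    rw [if_neg]
    rintro ⟨hmem, -⟩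
    exact hgt (by have := (PySem.List.mem_pyRange_one.mp hmem).2; omega)

-- ===== VERDICT (by name: the statement is the Claim_ definition above) =====
theorem find_regular_subgraphs_spec : Claim_equal_find_regular_subgraphs := by
  intro n edges _
  unfold Spec_find_regular_subgraphs
  simp only [find_regular_subgraphs, find_regular_subgraphs_alt]
  apply congrArg PySem.Dict.items
  apply PySem.List.foldl_congr_mem
  intro acc r hr
  apply PySem.List.foldl_congr_mem
  intro rs subset hsub
  obtain ⟨hsl, hlen⟩ := (PySem.List.mem_combinations_iff _ _ _).mp hsub
  have hnd : subset.Nodup := List.Nodup.sublist hsl (PySem.List.nodup_pyRange_one 0 n)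
  have hr1 : (1 : Int) ≤ r := (PySem.List.mem_pyRange_one.mp hr).1
  have hne : subset ≠ [] := by
    intro hnil
    rw [hnil] at hlen
    simp at hlen
    omega
  exact subset_step_eq n edges subset hnd hne rs
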